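-- pv_equiv track=rewrite | github.com/boggdan95/easy-table-tennis-event | src/ettem/bracket.py | _adjust_seed_positions_for_byes
-- ===== SOURCE A (Python) =====
-- def _adjust_seed_positions_for_byes(
--     seed_positions: list[int],
--     bye_positions: set[int],
--     bracket_size: int,
-- ) -> list[int]:
--     """Adjust seed positions so seeds land on non-BYE slots.
--
--     When a seed position falls on a BYE, redirect the seed to the
--     BYE's match partner (the other slot in the same first-round match).
--     This ensures top seeds get BYE advancement per ITTF rules.
--     """
--     result = []
--     used = set()
--
--     for pos in seed_positions:
--         if pos in bye_positions:
--             # Redirect to match partner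
--             partner = pos - 1 if pos % 2 == 0 else pos + 1
--             if partner not in used and partner not in bye_positions:
--                 result.append(partner)
--                 used.add(partner)
--             else:
--                 # Partner conflict, find next available
--                 for p in range(1, bracket_size + 1):
--                     if p not in bye_positions and p not in used:
--                         result.append(p)
--                         used.add(p)
--                         break
--         elif pos not in used:
--             result.append(pos)
--             used.add(pos)
--         else:
--             # Position already used, find next available
--             for p in range(1, bracket_size + 1):
--                 if p not in bye_positions and p not in used:
--                     result.append(p)
--                     used.add(p)
--                     break
--
--     return result
-- ===== SOURCE B (Python) =====
-- def _adjust_seed_positions_for_byes(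
--     seed_positions: list[int],
--     bye_positions: set[int],
--     bracket_size: int,
-- ) -> list[int]:
--     """Same result as A, but the 'next available slot' search keeps a
--     monotone cursor instead of rescanning 1..bracket_size every time:
--     the set of occupied/BYE slots only grows, so the smallest free slot
--     never decreases.  Amortized O(n + bracket_size) instead of O(n * bracket_size)."""
--     result = []
--     used = set()
--     cursor = 1  # every slot below cursor is a BYE or already used
--
--     def take_smallest_free():
--         nonlocal cursor
--         while cursor <= bracket_size and (cursor in bye_positions or cursor in used):
--             cursor += 1
--         if cursor <= bracket_size:
--             used.add(cursor)
--             result.append(cursor)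
--             cursor += 1
--
--     for pos in seed_positions:
--         if pos in bye_positions:
--             partner = pos - 1 if pos % 2 == 0 else pos + 1
--             if partner not in used and partner not in bye_positions:
--                 result.append(partner)
--                 used.add(partner)
--             else:
--                 take_smallest_free()
--         elif pos not in used:
--             result.append(pos)
--             used.add(pos)
--         else:
--             take_smallest_free()
--     return result
-- ===== Notes on version B (the rewrite author's own statement) =====
-- stated objective: faster
-- what changed: A rescans slots 1..bracket_size from scratch on every conflict; B keeps a monotone cursor (the occupied/BYE set only grows, so the smallest free slot never decreases) and advances it lazily, removing the repeated inner scan.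
import Mathlib
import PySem

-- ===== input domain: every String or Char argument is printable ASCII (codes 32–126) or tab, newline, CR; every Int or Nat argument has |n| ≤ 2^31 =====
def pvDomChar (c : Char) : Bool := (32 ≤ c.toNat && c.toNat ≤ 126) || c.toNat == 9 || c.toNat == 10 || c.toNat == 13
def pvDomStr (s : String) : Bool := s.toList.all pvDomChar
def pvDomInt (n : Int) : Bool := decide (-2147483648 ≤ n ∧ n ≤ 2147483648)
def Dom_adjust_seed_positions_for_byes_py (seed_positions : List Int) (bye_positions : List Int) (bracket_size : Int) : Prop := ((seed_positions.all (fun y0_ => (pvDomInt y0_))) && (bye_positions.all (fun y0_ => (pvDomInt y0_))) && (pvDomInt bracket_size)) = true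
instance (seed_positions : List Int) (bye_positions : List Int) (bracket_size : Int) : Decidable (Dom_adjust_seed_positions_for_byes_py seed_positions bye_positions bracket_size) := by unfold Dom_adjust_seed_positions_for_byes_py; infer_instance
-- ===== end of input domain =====

-- B replaces A's full rescan of 1..bracket_size for the "next available slot" by a
-- monotone cursor (the occupied set only grows, so the smallest free slot never
-- decreases); return values are proved equal on all inputs.

-- ===== PORT A =====
-- A's inner 'for p in range(1, bracket_size+1): … break' — first free slot, scanning from 1.
def pyFindFree (byes used : List Int) (bs : Int) : Option Int :=
  (PySem.List.pyRange 1 (bs + 1) 1).find? (fun p => !(byes.contains p) && !(used.contains p))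

def stepA (byes : List Int) (bs : Int) (st : List Int × List Int) (pos : Int) : List Int × List Int :=
  if byes.contains pos then
    let partner : Int := if PySem.Int.mod pos 2 = 0 then pos - 1 else pos + 1
    if !(st.2.contains partner) && !(byes.contains partner) then
      (st.1 ++ [partner], PySem.Set.add st.2 partner)
    else
      match pyFindFree byes st.2 bs with
      | some p => (st.1 ++ [p], PySem.Set.add st.2 p)
      | none => st
  else if !(st.2.contains pos) then
    (st.1 ++ [pos], PySem.Set.add st.2 pos)
  else
    match pyFindFree byes st.2 bs with
    | some p => (st.1 ++ [p], PySem.Set.add st.2 p)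
    | none => st

def adjust_seed_positions_for_byes_py (seed_positions : List Int) (bye_positions : List Int) (bracket_size : Int) : List Int :=
  (seed_positions.foldl (stepA bye_positions bracket_size) ([], PySem.Set.empty)).1

-- ===== PORT B =====
-- B's cursor advance: smallest free slot ≥ c, none once past bracket_size.
def advanceCursor (byes used : List Int) (bs : Int) (c : Int) : Option Int :=
  if bs < c then none
  else if byes.contains c || used.contains c then advanceCursor byes used bs (c + 1)
  else some c
termination_by (bs + 1 - c).toNat
decreasing_by simp_wf; omega

def goB (byes : List Int) (bs : Int) (used : List Int) (c : Int) : List Int → List Int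
  | [] => []
  | pos :: rest =>
    if byes.contains pos then
      let partner : Int := if PySem.Int.mod pos 2 = 0 then pos - 1 else pos + 1
      if !(used.contains partner) && !(byes.contains partner) then
        partner :: goB byes bs (PySem.Set.add used partner) c rest
      else
        match advanceCursor byes used bs c with
        | some p => p :: goB byes bs (PySem.Set.add used p) (p + 1) rest
        | none => goB byes bs used c rest
    else if !(used.contains pos) then
      pos :: goB byes bs (PySem.Set.add used pos) c rest
    else
      match advanceCursor byes used bs c with
      | some p => p :: goB byes bs (PySem.Set.add used p) (p + 1) rest
      | none => goB byes bs used c rest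

def adjust_seed_positions_for_byes_py_alt (seed_positions : List Int) (bye_positions : List Int) (bracket_size : Int) : List Int :=
  goB bye_positions bracket_size PySem.Set.empty 1 seed_positions

-- ===== PRECONDITION & SPEC =====
def Spec_adjust_seed_positions_for_byes_py (seed_positions : List Int) (bye_positions : List Int) (bracket_size : Int) (out : List Int) : Prop := out = adjust_seed_positions_for_byes_py_alt seed_positions bye_positions bracket_size
instance (seed_positions : List Int) (bye_positions : List Int) (bracket_size : Int) (out : List Int) : Decidable (Spec_adjust_seed_positions_for_byes_py seed_positions bye_positions bracket_size out) := by unfold Spec_adjust_seed_positions_for_byes_py; infer_instance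

-- ===== CLAIM (what is proved, stated in full; the proofs are below) =====
def Claim_equal_adjust_seed_positions_for_byes_py : Prop := ∀ (seed_positions : List Int) (bye_positions : List Int) (bracket_size : Int), Dom_adjust_seed_positions_for_byes_py seed_positions bye_positions bracket_size → Spec_adjust_seed_positions_for_byes_py seed_positions bye_positions bracket_size (adjust_seed_positions_for_byes_py seed_positions bye_positions bracket_size)

-- ===== LEMMAS AND PROOFS =====

-- Cursor invariant: every slot strictly below the cursor is a BYE or already used.
def CursorInv (byes used : List Int) (c : Int) : Prop :=
  1 ≤ c ∧ ∀ q : Int, 1 ≤ q → q < c → (byes.contains q || used.contains q) = true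

theorem contains_or_add (byes used : List Int) (q x : Int)
    (h : (byes.contains q || used.contains q) = true) :
    (byes.contains q || (PySem.Set.add used x).contains q) = true := by
  have h' : q ∈ byes ∨ q ∈ used := by simpa using h
  have : q ∈ byes ∨ q ∈ PySem.Set.add used x :=
    h'.imp id (fun hu => (PySem.Set.mem_add _ _ _).2 (Or.inl hu))
  simpa using this

theorem inv_add (byes used : List Int) (c x : Int) (h : CursorInv byes used c) :
    CursorInv byes (PySem.Set.add used x) c :=
  ⟨h.1, fun q h1 h2 => contains_or_add byes used q x (h.2 q h1 h2)⟩

theorem advance_eq_find (byes used : List Int) (bs c : Int) :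
    advanceCursor byes used bs c
      = (PySem.List.pyRange c (bs + 1) 1).find? (fun p => !(byes.contains p) && !(used.contains p)) := by
  rw [advanceCursor]
  by_cases h : bs < c
  · rw [if_pos h, PySem.List.pyRange_one_eq_nil (by omega)]
    rfl
  · rw [if_neg h, PySem.List.pyRange_one_cons (by omega), List.find?_cons]
    by_cases hc : (byes.contains c || used.contains c) = true
    · have hp : (!(byes.contains c) && !(used.contains c)) = false := by
        cases hb : byes.contains c <;> cases hu : used.contains c <;> simp_all
      rw [if_pos hc, hp]
      exact advance_eq_find byes used bs (c + 1)
    · have hp : (!(byes.contains c) && !(used.contains c)) = true := by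
        cases hb : byes.contains c <;> cases hu : used.contains c <;> simp_all
      rw [if_neg hc, hp]
termination_by (bs + 1 - c).toNat
decreasing_by simp_wf; omega

theorem find_drop (byes used : List Int) (bs a c : Int) (hac : a ≤ c)
    (hlow : ∀ q : Int, a ≤ q → q < c → (byes.contains q || used.contains q) = true) :
    (PySem.List.pyRange a (bs + 1) 1).find? (fun p => !(byes.contains p) && !(used.contains p))
      = (PySem.List.pyRange c (bs + 1) 1).find? (fun p => !(byes.contains p) && !(used.contains p)) := by
  by_cases hEq : a = c
  · rw [hEq]
  · have hlt : a < c := lt_of_le_of_ne hac hEq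
    by_cases hbs : bs < a
    · rw [PySem.List.pyRange_one_eq_nil (a := a) (by omega),
          PySem.List.pyRange_one_eq_nil (a := c) (by omega)]
    · rw [PySem.List.pyRange_one_cons (by omega)]
      have hfa := hlow a le_rfl hlt
      have hp : (!(byes.contains a) && !(used.contains a)) = false := by
        rcases Bool.or_eq_true_iff.mp hfa with h' | h' <;>
          simp only [h', Bool.not_true, Bool.false_and, Bool.and_false]
      rw [List.find?_cons, hp]
      exact find_drop byes used bs (a + 1) c (by omega)
        (fun q h1 h2 => hlow q (by omega) h2)
termination_by (c - a).toNat
decreasing_by simp_wf; omega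

theorem findFree_eq_advance (byes used : List Int) (bs c : Int) (h : CursorInv byes used c) :
    pyFindFree byes used bs = advanceCursor byes used bs c := by
  rw [advance_eq_find]
  exact find_drop byes used bs 1 c h.1 (fun q h1 h2 => h.2 q h1 h2)

theorem advance_skipped (byes used : List Int) (bs c p : Int)
    (h : advanceCursor byes used bs c = some p) :
    c ≤ p ∧ ∀ q : Int, c ≤ q → q < p → (byes.contains q || used.contains q) = true := by
  rw [advanceCursor] at h
  split at h
  · exact absurd h (by simp)
  · rename_i hbs
    by_cases hc : (byes.contains c || used.contains c) = true
    · rw [if_pos hc] at h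
      obtain ⟨h1, h2⟩ := advance_skipped byes used bs (c + 1) p h
      refine ⟨by omega, fun q hq1 hq2 => ?_⟩
      by_cases hqc : q = c
      · rw [hqc]; exact hc
      · exact h2 q (by omega) hq2
    · rw [if_neg hc] at h
      injection h with h
      subst h
      exact ⟨le_rfl, fun q h1 h2 => False.elim (by omega)⟩
termination_by (bs + 1 - c).toNat
decreasing_by simp_wf; omega

theorem inv_advance (byes used : List Int) (bs c p : Int) (h : CursorInv byes used c)
    (ha : advanceCursor byes used bs c = some p) :
    CursorInv byes (PySem.Set.add used p) (p + 1) := by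
  obtain ⟨hcp, hskip⟩ := advance_skipped byes used bs c p ha
  have hc1 := h.1
  refine ⟨by omega, fun q h1 h2 => ?_⟩
  by_cases hqp : q = p
  · subst hqp
    have hm : q ∈ PySem.Set.add used q := (PySem.Set.mem_add _ _ _).2 (Or.inr rfl)
    simp [hm]
  · have hq : q < p := by omega
    refine contains_or_add byes used q p ?_
    by_cases hqc : q < c
    · exact h.2 q h1 hqc
    · exact hskip q (by omega) hq

theorem foldl_stepA_eq_goB (byes : List Int) (bs : Int) (l : List Int)
    (res used : List Int) (c : Int) (h : CursorInv byes used c) :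
    (l.foldl (stepA byes bs) (res, used)).1 = res ++ goB byes bs used c l := by
  induction l generalizing res used c with
  | nil => simp [goB]
  | cons pos rest ih =>
    simp only [List.foldl_cons, goB, stepA]
    by_cases hb : byes.contains pos = true
    · rw [if_pos hb, if_pos hb]
      by_cases hfree :
          (!(used.contains (if PySem.Int.mod pos 2 = 0 then pos - 1 else pos + 1))
            && !(byes.contains (if PySem.Int.mod pos 2 = 0 then pos - 1 else pos + 1))) = true
      · rw [if_pos hfree, if_pos hfree]
        rw [ih (res ++ [_]) (PySem.Set.add used _) c (inv_add _ _ _ _ h)]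
        simp
      · rw [if_neg hfree, if_neg hfree, findFree_eq_advance byes used bs c h]
        cases hAdv : advanceCursor byes used bs c with
        | some p =>
          simp only
          rw [ih (res ++ [p]) (PySem.Set.add used p) (p + 1) (inv_advance byes used bs c p h hAdv)]
          simp
        | none =>
          simp only
          exact ih res used c h
    · rw [if_neg hb, if_neg hb]
      by_cases hu : used.contains pos = true
      · have hnp : ¬ ((!(used.contains pos)) = true) := by rw [hu]; simp
        rw [if_neg hnp, if_neg hnp, findFree_eq_advance byes used bs c h]
        cases hAdv : advanceCursor byes used bs c with
        | some p =>
          simp only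
          rw [ih (res ++ [p]) (PySem.Set.add used p) (p + 1) (inv_advance byes used bs c p h hAdv)]
          simp
        | none =>
          simp only
          exact ih res used c h
      · have hyp : (!(used.contains pos)) = true := by
          rw [Bool.eq_false_iff.mpr hu]; rfl
        rw [if_pos hyp, if_pos hyp]
        rw [ih (res ++ [pos]) (PySem.Set.add used pos) c (inv_add _ _ _ _ h)]
        simp

-- ===== VERDICT (by name: the statement is the Claim_ definition above) =====
theorem adjust_seed_positions_for_byes_py_spec : Claim_equal_adjust_seed_positions_for_byes_py := by
  intro seeds byes bs _
  unfold Spec_adjust_seed_positions_for_byes_py adjust_seed_positions_for_byes_py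
    adjust_seed_positions_for_byes_py_alt
  have h : CursorInv byes PySem.Set.empty 1 :=
    ⟨le_rfl, fun q h1 h2 => False.elim (by omega)⟩
  rw [foldl_stepA_eq_goB byes bs seeds [] PySem.Set.empty 1 h]
  simp
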